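-- pv_equiv track=rewrite | github.com/carrola1/MonsterCalc | calc.py | _argument_progress
-- ===== SOURCE A (Python) =====
-- def _argument_progress(argument_text: str) -> tuple[int, str]:
--     depth = 0
--     arg_index = 0
--     current_fragment_chars: list[str] = []
--
--     for char in argument_text:
--         if char == "," and depth == 0:
--             arg_index += 1
--             current_fragment_chars = []
--             continue
--         if char == "(":
--             depth += 1
--         elif char == ")" and depth > 0:
--             depth -= 1
--         current_fragment_chars.append(char)
--
--     return arg_index, "".join(current_fragment_chars).strip()
-- ===== SOURCE B (Python) =====
-- def _argument_progress(argument_text: str) -> tuple[int, str]: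
--     depth = 0
--     count = 0
--     last = -1  # index of the last top-level comma seen
--
--     for i, char in enumerate(argument_text):
--         if char == "," and depth == 0:
--             count += 1
--             last = i
--         elif char == "(":
--             depth += 1
--         elif char == ")" and depth > 0:
--             depth -= 1
--
--     return count, argument_text[last + 1:].strip()
-- ===== Notes on version B (the rewrite author's own statement) =====
-- stated objective: simpler
-- what changed: Instead of accumulating and resetting a list of fragment characters, B only records the index of the last top-level comma and returns the stripped tail slice after it.
import Mathlib
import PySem

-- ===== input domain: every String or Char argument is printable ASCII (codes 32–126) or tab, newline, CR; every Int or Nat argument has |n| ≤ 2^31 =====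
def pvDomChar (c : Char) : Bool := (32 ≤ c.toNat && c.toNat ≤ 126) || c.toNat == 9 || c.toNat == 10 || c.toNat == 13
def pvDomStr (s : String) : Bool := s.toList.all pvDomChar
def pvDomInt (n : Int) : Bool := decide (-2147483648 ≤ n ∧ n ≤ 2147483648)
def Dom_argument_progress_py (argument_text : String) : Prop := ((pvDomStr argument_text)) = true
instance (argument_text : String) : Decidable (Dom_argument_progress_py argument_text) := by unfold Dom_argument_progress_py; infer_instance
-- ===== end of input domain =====

-- B replaces A's accumulate-and-reset fragment buffer by recording the index of the
-- last top-level comma and slicing the tail once; objective: simpler (same O(n) cost).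

-- ===== PORT A =====
-- state: (depth, arg_index, current_fragment_chars)
def pvStepA (s : Int × Int × List Char) (c : Char) : Int × Int × List Char :=
  if c = ',' ∧ s.1 = 0 then (s.1, s.2.1 + 1, [])
  else
    let depth := if c = '(' then s.1 + 1 else if c = ')' ∧ s.1 > 0 then s.1 - 1 else s.1
    (depth, s.2.1, s.2.2 ++ [c])

def argument_progress_py (argument_text : String) : Int × String :=
  let r := argument_text.toList.foldl pvStepA (0, 0, [])
  (r.2.1, PySem.Str.strip (String.ofList r.2.2))

-- ===== PORT B =====
-- state: (i, depth, count, last) — 'for i, char in enumerate(...)' carried as the index i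
def pvStepB (s : Int × Int × Int × Int) (c : Char) : Int × Int × Int × Int :=
  if c = ',' ∧ s.2.1 = 0 then (s.1 + 1, s.2.1, s.2.2.1 + 1, s.1)
  else if c = '(' then (s.1 + 1, s.2.1 + 1, s.2.2.1, s.2.2.2)
  else if c = ')' ∧ s.2.1 > 0 then (s.1 + 1, s.2.1 - 1, s.2.2.1, s.2.2.2)
  else (s.1 + 1, s.2.1, s.2.2.1, s.2.2.2)

def argument_progress_py_alt (argument_text : String) : Int × String :=
  let r := argument_text.toList.foldl pvStepB (0, 0, 0, -1)
  (r.2.2.1, PySem.Str.strip (PySem.Str.slice argument_text (some (r.2.2.2 + 1)) none))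

-- ===== PRECONDITION & SPEC =====
def Spec_argument_progress_py (argument_text : String) (out : Int × String) : Prop := out = argument_progress_py_alt argument_text
instance (argument_text : String) (out : Int × String) : Decidable (Spec_argument_progress_py argument_text out) := by unfold Spec_argument_progress_py; infer_instance

-- ===== CLAIM (what is proved, stated in full; the proofs are below) =====
def Claim_equal_argument_progress_py : Prop := ∀ (argument_text : String), Dom_argument_progress_py argument_text → Spec_argument_progress_py argument_text (argument_progress_py argument_text)

-- ===== LEMMAS AND PROOFS =====

-- Invariant tying A's fragment buffer to B's last-comma index.
theorem pv_inv (cs : List Char) : ∀ (i d k lb : Int) (acc : List Char), lb < i →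
    (let r := cs.foldl pvStepB (i, d, k, lb);
     (r.2.2.2 = lb ∨ (i ≤ r.2.2.2 ∧ r.2.2.2 < i + cs.length)) ∧
      cs.foldl pvStepA (d, k, acc) =
        (r.2.1, r.2.2.1, if r.2.2.2 = lb then acc ++ cs else cs.drop (r.2.2.2 - i + 1).toNat)) := by
  induction cs with
  | nil => intro i d k lb acc h; simp
  | cons c cs ih =>
    intro i d k lb acc h
    by_cases hc : c = ',' ∧ d = 0
    · obtain ⟨hc1, hc2⟩ := hc
      subst hc1; subst hc2
      simp only [List.foldl_cons,
        show pvStepA (0, k, acc) ',' = (0, k + 1, []) from by simp [pvStepA],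
        show pvStepB (i, 0, k, lb) ',' = (i + 1, 0, k + 1, i) from by simp [pvStepB]]
      obtain ⟨hlr, hA⟩ := ih (i+1) 0 (k+1) i [] (by omega)
      refine ⟨?_, ?_⟩
      · rcases hlr with h1 | h1 <;>
          exact Or.inr (by simp only [List.length_cons]; push_cast; omega)
      · rw [hA]
        rcases hlr with h1 | h1
        · rw [if_pos h1, if_neg (by omega)]
          simp [h1]
        · rw [if_neg (by omega), if_neg (by omega)]
          have h2 : ((cs.foldl pvStepB (i+1, 0, k+1, i)).2.2.2 - i + 1).toNat
              = ((cs.foldl pvStepB (i+1, 0, k+1, i)).2.2.2 - (i+1) + 1).toNat + 1 := by omega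
          simp [h2]
    · have hA1 : pvStepA (d, k, acc) c =
          ((if c = '(' then d + 1 else if c = ')' ∧ d > 0 then d - 1 else d), k, acc ++ [c]) := by
        simp [pvStepA, hc]
      have hB1 : pvStepB (i, d, k, lb) c =
          (i + 1, (if c = '(' then d + 1 else if c = ')' ∧ d > 0 then d - 1 else d), k, lb) := by
        by_cases h1 : c = '('
        · simp [pvStepB, h1]
        · by_cases h2 : c = ')' ∧ d > 0 <;> simp [pvStepB, hc, h1, h2]
      set d' := if c = '(' then d + 1 else if c = ')' ∧ d > 0 then d - 1 else d with hd'
      simp only [List.foldl_cons, hA1, hB1]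
      obtain ⟨hlr, hA⟩ := ih (i+1) d' k lb (acc ++ [c]) (by omega)
      refine ⟨?_, ?_⟩
      · rcases hlr with h1 | h1 <;> [left; right] <;> simp_all <;> omega
      · rw [hA]
        rcases hlr with h1 | h1
        · simp [h1]
        · rw [if_neg (by omega), if_neg (by omega)]
          have h2 : ((cs.foldl pvStepB (i+1, d', k, lb)).2.2.2 - i + 1).toNat
              = ((cs.foldl pvStepB (i+1, d', k, lb)).2.2.2 - (i+1) + 1).toNat + 1 := by omega
          simp [h2]

theorem pv_toList_inj (a b : String) (h : a.toList = b.toList) : a = b := by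
  have := congrArg String.ofList h
  simpa using this

-- ===== VERDICT (by name: the statement is the Claim_ definition above) =====
theorem argument_progress_py_spec : Claim_equal_argument_progress_py := by
  intro s _
  unfold Spec_argument_progress_py argument_progress_py argument_progress_py_alt
  obtain ⟨hlr, hA⟩ := pv_inv s.toList 0 0 0 (-1) [] (by omega)
  rw [hA]
  set r := s.toList.foldl pvStepB (0, 0, 0, -1) with hr
  have hlb : -1 ≤ r.2.2.2 := by rcases hlr with h | h <;> omega
  have hs : PySem.Str.slice s (some (r.2.2.2 + 1)) none =
      String.ofList (s.toList.drop (r.2.2.2 + 1).toNat) := by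
    apply pv_toList_inj
    rw [PySem.Str.toList_slice]
    simp [PySem.List.slice_from _ (by omega : (0:Int) ≤ r.2.2.2 + 1)]
  dsimp only
  rw [hs]
  rcases hlr with h | h
  · simp [h]
  · rw [if_neg (by omega)]
    have h0 : r.2.2.2 - 0 + 1 = r.2.2.2 + 1 := by omega
    rw [h0]
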